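-- pv_equiv track=rewrite | github.com/johnwsampson/single-file-bench | scripts/sft_grepcode.py | _parse_grep_results
-- ===== SOURCE A (Python) =====
-- from typing import Any
--
-- def _parse_grep_results(text: str) -> list[dict[str, Any]]:
--     """Parse grep.app text results into structured data."""
--     results = []
--     current = {}
--     in_snippets = False
--     snippet_lines = []
--
--     for line in text.split("\n"):
--         line_stripped = line.strip()
--
--         if line_stripped.startswith("Repository:"):
--             # Save previous result
--             if current:
--                 if snippet_lines:
--                     current["snippets"] = "\n".join(snippet_lines)
--                 results.append(current)
--             current = {"repository": line_stripped[12:].strip()}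
--             snippet_lines = []
--             in_snippets = False
--
--         elif line_stripped.startswith("Path:"):
--             current["path"] = line_stripped[5:].strip()
--
--         elif line_stripped.startswith("URL:"):
--             current["url"] = line_stripped[4:].strip()
--
--         elif line_stripped.startswith("License:"):
--             current["license"] = line_stripped[8:].strip()
--
--         elif line_stripped.startswith("Snippets:"):
--             in_snippets = True
--
--         elif line_stripped.startswith("--- Snippet"):
--             if snippet_lines:
--                 snippet_lines.append("")  # Separator between snippets
--             snippet_lines.append(line_stripped)
--
--         elif in_snippets and line:
--             snippet_lines.append(line)
--
--     # Don't forget the last result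
--     if current:
--         if snippet_lines:
--             current["snippets"] = "\n".join(snippet_lines)
--         results.append(current)
--
--     return results
-- ===== SOURCE B (Python) =====
-- def _parse_grep_results(text: str) -> list:
--     """Parse grep.app text results: split into blocks at 'Repository:' lines, then parse each block."""
--     blocks = []
--     block = []
--     for line in text.split("\n"):
--         if line.strip().startswith("Repository:"):
--             blocks.append(block)
--             block = [line]
--         else:
--             block.append(line)
--     blocks.append(block)
--     return [rec for rec in map(_parse_block, blocks) if rec]
--
--
-- def _parse_block(blk: list) -> dict:
--     rec = {}
--     snips = []
--     in_sn = False
--     for line in blk: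
--         ls = line.strip()
--         if ls.startswith("Repository:"):
--             rec["repository"] = ls[12:].strip()
--         elif ls.startswith("Path:"):
--             rec["path"] = ls[5:].strip()
--         elif ls.startswith("URL:"):
--             rec["url"] = ls[4:].strip()
--         elif ls.startswith("License:"):
--             rec["license"] = ls[8:].strip()
--         elif ls.startswith("Snippets:"):
--             in_sn = True
--         elif ls.startswith("--- Snippet"):
--             if snips:
--                 snips.append("")
--             snips.append(ls)
--         elif in_sn and line:
--             snips.append(line)
--     if rec and snips:
--         rec["snippets"] = "\n".join(snips)
--     return rec
-- ===== Notes on version B (the rewrite author's own statement) =====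
-- stated objective: alternative
-- what changed: Replaced the single-pass parser with mutable cross-line state by a two-phase decomposition: first split the lines into blocks at each 'Repository:' boundary, then parse each block independently into a record, keeping only non-empty records.
import Mathlib
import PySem

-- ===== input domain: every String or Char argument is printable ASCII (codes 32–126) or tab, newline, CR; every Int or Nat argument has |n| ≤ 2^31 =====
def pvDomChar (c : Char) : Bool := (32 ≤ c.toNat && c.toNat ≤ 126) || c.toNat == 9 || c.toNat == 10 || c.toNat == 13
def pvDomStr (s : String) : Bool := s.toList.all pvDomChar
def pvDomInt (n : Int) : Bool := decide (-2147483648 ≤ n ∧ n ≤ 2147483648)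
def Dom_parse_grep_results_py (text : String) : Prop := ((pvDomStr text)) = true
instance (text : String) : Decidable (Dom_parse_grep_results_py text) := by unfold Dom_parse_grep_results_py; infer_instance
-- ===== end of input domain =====

-- B replaces A's single pass with mutable cross-line state by a two-phase decomposition
-- (split the lines into blocks at 'Repository:' boundaries, then parse each block); same cost.

-- ===== PORT A =====
-- the duplicated 'if current: … results.append(current)' save code of A
def pvSaveA (res : List (List (String × String))) (cur : PySem.Dict String String)
    (sn : List String) : List (List (String × String)) :=
  if cur.items ≠ [] then
    res ++ [(if sn ≠ [] then cur.insert "snippets" (PySem.Str.join "\n" sn) else cur).items]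
  else res

def pvStepA (st : List (List (String × String)) × PySem.Dict String String × Bool × List String)
    (line : String) :
    List (List (String × String)) × PySem.Dict String String × Bool × List String :=
  match st with
  | (res, cur, insn, sn) =>
    let ls := PySem.Str.strip line
    if PySem.Str.startswith ls "Repository:" then
      (pvSaveA res cur sn,
       PySem.Dict.empty.insert "repository" (PySem.Str.strip (PySem.Str.slice ls (some 12) none)),
       false, [])
    else if PySem.Str.startswith ls "Path:" then
      (res, cur.insert "path" (PySem.Str.strip (PySem.Str.slice ls (some 5) none)), insn, sn)
    else if PySem.Str.startswith ls "URL:" then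
      (res, cur.insert "url" (PySem.Str.strip (PySem.Str.slice ls (some 4) none)), insn, sn)
    else if PySem.Str.startswith ls "License:" then
      (res, cur.insert "license" (PySem.Str.strip (PySem.Str.slice ls (some 8) none)), insn, sn)
    else if PySem.Str.startswith ls "Snippets:" then
      (res, cur, true, sn)
    else if PySem.Str.startswith ls "--- Snippet" then
      (res, cur, insn, (if sn ≠ [] then sn ++ [""] else sn) ++ [ls])
    else if insn && line ≠ "" then
      (res, cur, insn, sn ++ [line])
    else
      (res, cur, insn, sn)

def parse_grep_results_py (text : String) : List (List (String × String)) :=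
  match ((PySem.Str.split? text "\n").getD []).foldl pvStepA ([], PySem.Dict.empty, false, []) with
  | (res, cur, _insn, sn) => pvSaveA res cur sn

-- ===== PORT B =====
def pvStepB (st : PySem.Dict String String × Bool × List String) (line : String) :
    PySem.Dict String String × Bool × List String :=
  match st with
  | (rec, insn, sn) =>
    let ls := PySem.Str.strip line
    if PySem.Str.startswith ls "Repository:" then
      (rec.insert "repository" (PySem.Str.strip (PySem.Str.slice ls (some 12) none)), insn, sn)
    else if PySem.Str.startswith ls "Path:" then
      (rec.insert "path" (PySem.Str.strip (PySem.Str.slice ls (some 5) none)), insn, sn)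
    else if PySem.Str.startswith ls "URL:" then
      (rec.insert "url" (PySem.Str.strip (PySem.Str.slice ls (some 4) none)), insn, sn)
    else if PySem.Str.startswith ls "License:" then
      (rec.insert "license" (PySem.Str.strip (PySem.Str.slice ls (some 8) none)), insn, sn)
    else if PySem.Str.startswith ls "Snippets:" then
      (rec, true, sn)
    else if PySem.Str.startswith ls "--- Snippet" then
      (rec, insn, (if sn ≠ [] then sn ++ [""] else sn) ++ [ls])
    else if insn && line ≠ "" then
      (rec, insn, sn ++ [line])
    else
      (rec, insn, sn)

def pvParseBlock (blk : List String) : List (String × String) :=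
  match blk.foldl pvStepB (PySem.Dict.empty, false, []) with
  | (rec, _insn, sn) =>
    (if rec.items ≠ [] ∧ sn ≠ [] then rec.insert "snippets" (PySem.Str.join "\n" sn) else rec).items

def pvSplitStep (st : List (List String) × List String) (line : String) :
    List (List String) × List String :=
  if PySem.Str.startswith (PySem.Str.strip line) "Repository:" then (st.1 ++ [st.2], [line])
  else (st.1, st.2 ++ [line])

def parse_grep_results_py_alt (text : String) : List (List (String × String)) :=
  match ((PySem.Str.split? text "\n").getD []).foldl pvSplitStep ([], []) with
  | (bs, b) => ((bs ++ [b]).map pvParseBlock).filter (fun r => r ≠ [])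

-- ===== PRECONDITION & SPEC =====
def Spec_parse_grep_results_py (text : String) (out : List (List (String × String))) : Prop := out = parse_grep_results_py_alt text
instance (text : String) (out : List (List (String × String))) : Decidable (Spec_parse_grep_results_py text out) := by unfold Spec_parse_grep_results_py; infer_instance

-- ===== CLAIM (what is proved, stated in full; the proofs are below) =====
def Claim_equal_parse_grep_results_py : Prop := ∀ (text : String), Dom_parse_grep_results_py text → Spec_parse_grep_results_py text (parse_grep_results_py text)

-- ===== LEMMAS AND PROOFS =====
def pvIsRepo (line : String) : Bool :=
  PySem.Str.startswith (PySem.Str.strip line) "Repository:"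

-- the records A and B still emit when the loop continues from inner state st = (cur, insn, sn)
def pvC (st : PySem.Dict String String × Bool × List String) :
    List String → List (List (String × String))
  | [] => pvSaveA [] st.1 st.2.2
  | l :: rest =>
    if pvIsRepo l then
      pvSaveA [] st.1 st.2.2 ++
        pvC (PySem.Dict.empty.insert "repository"
              (PySem.Str.strip (PySem.Str.slice (PySem.Str.strip l) (some 12) none)), false, []) rest
    else
      pvC (pvStepB st l) rest

def pvFinishA (q : List (List (String × String)) × PySem.Dict String String × Bool × List String) :
    List (List (String × String)) :=
  pvSaveA q.1 q.2.1 q.2.2.2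

theorem pvC_nil (st : PySem.Dict String String × Bool × List String) :
    pvC st [] = pvSaveA [] st.1 st.2.2 := rfl

theorem pvC_cons (st : PySem.Dict String String × Bool × List String) (l : String)
    (rest : List String) :
    pvC st (l :: rest) =
      if pvIsRepo l then
        pvSaveA [] st.1 st.2.2 ++
          pvC (PySem.Dict.empty.insert "repository"
                (PySem.Str.strip (PySem.Str.slice (PySem.Str.strip l) (some 12) none)), false, []) rest
      else
        pvC (pvStepB st l) rest := rfl

theorem pvInsert_items_ne_nil (d : PySem.Dict String String) (k v : String) :
    (d.insert k v).items ≠ [] := by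
  rw [PySem.Dict.items_insert]
  split_ifs with h
  · have hk : k ∈ d.keys := (PySem.Dict.contains_iff_mem_keys d k).mp h
    have hne : d.items ≠ [] := by
      intro hnil
      simp only [PySem.Dict.keys, hnil, List.map_nil] at hk
      exact (List.not_mem_nil) hk
    simpa using hne
  · simp

theorem pvSaveA_shift (res : List (List (String × String))) (cur : PySem.Dict String String)
    (sn : List String) : pvSaveA res cur sn = res ++ pvSaveA [] cur sn := by
  unfold pvSaveA; split <;> simp

theorem pvStepA_nonrepo (res : List (List (String × String))) (cur : PySem.Dict String String)
    (insn : Bool) (sn : List String) (l : String) (h : pvIsRepo l = false) :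
    pvStepA (res, cur, insn, sn) l = (res, pvStepB (cur, insn, sn) l) := by
  simp only [pvIsRepo] at h
  simp only [pvStepA, pvStepB, h, Bool.false_eq_true, if_false]
  split_ifs <;> rfl

theorem pvStepA_repo (res : List (List (String × String))) (cur : PySem.Dict String String)
    (insn : Bool) (sn : List String) (l : String) (h : pvIsRepo l = true) :
    pvStepA (res, cur, insn, sn) l =
      (pvSaveA res cur sn,
       PySem.Dict.empty.insert "repository"
         (PySem.Str.strip (PySem.Str.slice (PySem.Str.strip l) (some 12) none)), false, []) := by
  simp only [pvIsRepo] at h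
  simp only [pvStepA, h, if_true]

theorem pvA_loop (lines : List String) : ∀ (res : List (List (String × String)))
    (cur : PySem.Dict String String) (insn : Bool) (sn : List String),
    pvFinishA (lines.foldl pvStepA (res, cur, insn, sn)) = res ++ pvC (cur, insn, sn) lines := by
  induction lines with
  | nil =>
    intro res cur insn sn
    exact pvSaveA_shift res cur sn
  | cons l rest ih =>
    intro res cur insn sn
    by_cases hr : pvIsRepo l = true
    · rw [List.foldl_cons, pvStepA_repo res cur insn sn l hr, ih,
        pvSaveA_shift res cur sn, List.append_assoc, pvC_cons, if_pos hr]
    · have hrf : pvIsRepo l = false := Bool.eq_false_iff.mpr hr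
      rw [List.foldl_cons, pvStepA_nonrepo res cur insn sn l hrf]
      rcases hs : pvStepB (cur, insn, sn) l with ⟨c, i, s⟩
      rw [ih, pvC_cons, if_neg hr, hs]

theorem pvParseBlock_filter (blk : List String) :
    ([pvParseBlock blk]).filter (fun r => r ≠ []) =
      pvSaveA [] (blk.foldl pvStepB (PySem.Dict.empty, false, [])).1
        (blk.foldl pvStepB (PySem.Dict.empty, false, [])).2.2 := by
  unfold pvParseBlock
  rcases blk.foldl pvStepB (PySem.Dict.empty, false, []) with ⟨cur, insn, sn⟩
  show (List.filter (fun r => r ≠ [])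
      [(if cur.items ≠ [] ∧ sn ≠ [] then
          cur.insert "snippets" (PySem.Str.join "\n" sn) else cur).items]) =
    pvSaveA [] cur sn
  unfold pvSaveA
  by_cases hc : cur.items = []
  · simp [hc]
  · by_cases hs : sn = []
    · simp [hc, hs]
    · simp [hc, hs, pvInsert_items_ne_nil]

theorem pvB_loop (lines : List String) : ∀ (bs : List (List String)) (blk : List String),
    (((lines.foldl pvSplitStep (bs, blk)).1 ++
        [(lines.foldl pvSplitStep (bs, blk)).2]).map pvParseBlock).filter (fun r => r ≠ []) =
      (bs.map pvParseBlock).filter (fun r => r ≠ []) ++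
        pvC (blk.foldl pvStepB (PySem.Dict.empty, false, [])) lines := by
  induction lines with
  | nil =>
    intro bs blk
    simp only [List.foldl_nil, List.map_append, List.map_cons, List.map_nil, List.filter_append]
    rw [pvC_nil, pvParseBlock_filter blk]
  | cons l rest ih =>
    intro bs blk
    by_cases hr : pvIsRepo l = true
    · have hr' : PySem.Str.startswith (PySem.Str.strip l) "Repository:" = true := hr
      have hstep : pvSplitStep (bs, blk) l = (bs ++ [blk], [l]) := by
        unfold pvSplitStep; rw [if_pos hr']
      have hcore : ([l] : List String).foldl pvStepB (PySem.Dict.empty, false, []) =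
          (PySem.Dict.empty.insert "repository"
            (PySem.Str.strip (PySem.Str.slice (PySem.Str.strip l) (some 12) none)), false, []) := by
        simp only [List.foldl_cons, List.foldl_nil, pvStepB]
        rw [if_pos hr']
      rw [List.foldl_cons, hstep, ih, hcore, List.map_append, List.filter_append,
        List.map_cons, List.map_nil, pvParseBlock_filter blk, List.append_assoc,
        pvC_cons, if_pos hr]
    · have hr' : PySem.Str.startswith (PySem.Str.strip l) "Repository:" = false :=
        Bool.eq_false_iff.mpr hr
      have hstep : pvSplitStep (bs, blk) l = (bs, blk ++ [l]) := by
        unfold pvSplitStep; rw [if_neg (by rw [hr']; exact Bool.false_ne_true)]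
      have hcore : (blk ++ [l]).foldl pvStepB (PySem.Dict.empty, false, []) =
          pvStepB (blk.foldl pvStepB (PySem.Dict.empty, false, [])) l := by
        rw [List.foldl_append]
        rfl
      rw [List.foldl_cons, hstep, ih, hcore, pvC_cons, if_neg hr]

-- ===== VERDICT (by name: the statement is the Claim_ definition above) =====
theorem parse_grep_results_py_spec : Claim_equal_parse_grep_results_py := by
  intro text _
  show parse_grep_results_py text = parse_grep_results_py_alt text
  unfold parse_grep_results_py parse_grep_results_py_alt
  rcases hqa : ((PySem.Str.split? text "\n").getD []).foldl pvStepA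
      ([], PySem.Dict.empty, false, []) with ⟨res, cur, insn, sn⟩
  rcases hqb : ((PySem.Str.split? text "\n").getD []).foldl pvSplitStep ([], [])
      with ⟨bs, b⟩
  have hA := pvA_loop ((PySem.Str.split? text "\n").getD []) [] PySem.Dict.empty false []
  rw [hqa] at hA
  have hB := pvB_loop ((PySem.Str.split? text "\n").getD []) [] []
  rw [hqb] at hB
  exact hA.trans hB.symm
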